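-- pv_equiv track=rewrite | github.com/Apex-Capstone/capstone | backend/src/adapters/audio_tone_adapter.py | _count_pauses
-- ===== SOURCE A (Python) =====
-- def _count_pauses(voiced_frames: list[bool]) -> int:
--     """Count substantial silent gaps between voiced regions."""
--     pauses = 0
--     silence_run = 0
--     for voiced in voiced_frames:
--         if voiced:
--             if silence_run >= 9:
--                 pauses += 1
--             silence_run = 0
--             continue
--         silence_run += 1
--     return pauses
-- ===== SOURCE B (Python) =====
-- def _count_pauses(voiced_frames: list[bool]) -> int:
--     """Count substantial silent gaps between voiced regions."""
--     # run-length encode, then count long silence runs that are not the final run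
--     runs = []
--     for v in voiced_frames:
--         if runs and runs[-1][0] == v:
--             runs[-1][1] += 1
--         else:
--             runs.append([v, 1])
--     return sum(1 for v, n in runs[:-1] if not v and n >= 9)
-- ===== Notes on version B (the rewrite author's own statement) =====
-- stated objective: alternative
-- what changed: Replaces A's single stateful scan (pauses/silence_run counters) by run-length encoding the frames into maximal runs and counting long silence runs that are not the final run.
import Mathlib
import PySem

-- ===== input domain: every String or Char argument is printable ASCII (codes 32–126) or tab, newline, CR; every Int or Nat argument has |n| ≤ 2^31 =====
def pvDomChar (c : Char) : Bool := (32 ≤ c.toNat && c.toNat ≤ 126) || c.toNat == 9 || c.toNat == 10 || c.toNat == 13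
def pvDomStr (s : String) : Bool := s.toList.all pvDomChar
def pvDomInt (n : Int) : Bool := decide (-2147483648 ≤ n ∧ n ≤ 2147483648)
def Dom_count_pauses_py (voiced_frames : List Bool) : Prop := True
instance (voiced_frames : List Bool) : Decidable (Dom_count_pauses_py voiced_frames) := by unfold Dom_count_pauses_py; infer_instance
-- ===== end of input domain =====

-- B replaces A's single stateful scan by run-length encoding followed by a count
-- of long non-final silence runs (objective: alternative decomposition, same cost).

-- ===== PORT A =====
-- state (pauses, silence_run), exactly A's loop
def pvStepA (st : Int × Int) (voiced : Bool) : Int × Int :=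
  if voiced then (if st.2 ≥ 9 then (st.1 + 1, 0) else (st.1, 0)) else (st.1, st.2 + 1)

def count_pauses_py (voiced_frames : List Bool) : Int :=
  (voiced_frames.foldl pvStepA (0, 0)).1

-- ===== PORT B =====
-- run-length encoding, as Source B builds it (extend the last run or append a new one)
def pvRLE (voiced_frames : List Bool) : List (Bool × Nat) :=
  voiced_frames.foldl (fun runs v =>
    match runs.getLast? with
    | some (w, n) => if w == v then runs.dropLast ++ [(w, n + 1)] else runs ++ [(v, 1)]
    | none => [(v, 1)]) []

def pvLongSilence (p : Bool × Nat) : Bool := !p.1 && decide (9 ≤ p.2)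

def count_pauses_py_alt (voiced_frames : List Bool) : Int :=
  (((pvRLE voiced_frames).dropLast.filter pvLongSilence).length : Int)

-- ===== PRECONDITION & SPEC =====
def Spec_count_pauses_py (voiced_frames : List Bool) (out : Int) : Prop := out = count_pauses_py_alt voiced_frames
instance (voiced_frames : List Bool) (out : Int) : Decidable (Spec_count_pauses_py voiced_frames out) := by unfold Spec_count_pauses_py; infer_instance

-- ===== CLAIM (what is proved, stated in full; the proofs are below) =====
def Claim_equal_count_pauses_py : Prop := ∀ (voiced_frames : List Bool), Dom_count_pauses_py voiced_frames → Spec_count_pauses_py voiced_frames (count_pauses_py voiced_frames)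

-- ===== LEMMAS AND PROOFS =====

-- value of B's count on a run list
def pvCnt (runs : List (Bool × Nat)) : Int := ((runs.dropLast.filter pvLongSilence).length : Int)
-- length of the trailing silence run (0 if the last run is voiced or the list is empty)
def pvTail (runs : List (Bool × Nat)) : Int :=
  match runs.getLast? with
  | some (false, n) => (n : Int)
  | _ => 0

lemma pvRLE_concat (l : List Bool) (v : Bool) :
    pvRLE (l ++ [v]) =
      (match (pvRLE l).getLast? with
       | some (w, n) => if w == v then (pvRLE l).dropLast ++ [(w, n + 1)] else pvRLE l ++ [(v, 1)]
       | none => [(v, 1)]) := by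
  simp [pvRLE, List.foldl_concat]

lemma pvFiltSing (b : Bool) (n : Nat) :
    (List.filter pvLongSilence [(b, n)]).length = if !b && decide (9 ≤ n) then 1 else 0 := by
  cases b <;> by_cases h : 9 ≤ n <;> simp [List.filter, pvLongSilence, h]

lemma pvInv (l : List Bool) :
    l.foldl pvStepA (0, 0) = (pvCnt (pvRLE l), pvTail (pvRLE l)) := by
  induction l using List.reverseRecOn with
  | nil => simp [pvCnt, pvTail, pvRLE]
  | append_singleton l v ih =>
    rw [List.foldl_append, List.foldl_cons, List.foldl_nil, ih, pvRLE_concat]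
    match h : (pvRLE l).getLast? with
    | none =>
      have he : pvRLE l = [] := List.getLast?_eq_none_iff.mp h
      cases v <;> simp [he, pvStepA, pvCnt, pvTail]
    | some (w, n) =>
      obtain ⟨l', hl'⟩ := List.getLast?_eq_some_iff.mp h
      cases v <;> cases w <;>
        simp [hl', pvStepA, pvCnt, pvTail, List.filter_append, pvFiltSing] <;>
        split_ifs <;> simp_all <;> omega

-- ===== VERDICT (by name: the statement is the Claim_ definition above) =====
theorem count_pauses_py_spec : Claim_equal_count_pauses_py := by
  intro l _
  unfold Spec_count_pauses_py count_pauses_py count_pauses_py_alt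
  rw [pvInv]
  rfl
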